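-- pv_equiv track=rewrite | github.com/dhermes/usa-educational-attainment | analyze_2000.py | join_separated_phrase
-- ===== SOURCE A (Python) =====
-- def join_separated_phrase(phrase_parts):
--     actual_parts = []
--     hyphen_found = False
--     for part in phrase_parts:
--         to_add = part.strip()
--         if not hyphen_found:
--             to_add = ' ' + to_add
--
--         # Intentionally using `part`, not `to_add` here.
--         if part.endswith('-'):
--             hyphen_found = True
--             to_add = to_add[:-1]
--         else:
--             hyphen_found = False
--
--         actual_parts.append(to_add)
--     return ''.join(actual_parts).strip()
-- ===== SOURCE B (Python) =====
-- def join_separated_phrase(phrase_parts):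
--     words = []
--     i = 0
--     n = len(phrase_parts)
--     while i < n:
--         word = ''
--         while i < n and phrase_parts[i].endswith('-'):
--             word += phrase_parts[i].strip()[:-1]
--             i += 1
--         if i < n:
--             word += phrase_parts[i].strip()
--             i += 1
--         words.append(word)
--     return ' '.join(words).strip()
-- ===== Notes on version B (the rewrite author's own statement) =====
-- stated objective: alternative
-- what changed: B replaces A's single flag-driven pass (which emits space-prefixed fragments and concatenates them with ''.join) by a nested word-at-a-time scan: an inner loop consumes hyphen-continuation parts into one whole word, an outer loop collects the words, finally joined with ' '.join.
import Mathlib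
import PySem

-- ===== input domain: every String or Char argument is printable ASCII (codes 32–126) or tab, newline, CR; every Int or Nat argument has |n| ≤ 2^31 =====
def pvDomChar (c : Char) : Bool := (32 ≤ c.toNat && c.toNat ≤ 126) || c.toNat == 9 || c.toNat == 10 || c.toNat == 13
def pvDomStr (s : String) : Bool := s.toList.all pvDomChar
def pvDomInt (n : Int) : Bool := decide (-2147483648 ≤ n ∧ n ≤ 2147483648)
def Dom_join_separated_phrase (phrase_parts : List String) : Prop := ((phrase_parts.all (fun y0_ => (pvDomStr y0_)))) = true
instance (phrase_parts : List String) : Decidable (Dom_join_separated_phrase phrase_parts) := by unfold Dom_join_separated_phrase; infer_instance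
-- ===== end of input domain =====

-- B replaces A's single flag-driven pass (space-prefixed fragments + ''.join) by a nested
-- word-at-a-time scan: an inner loop consumes hyphen-continuation parts into one word, an
-- outer loop collects the words, joined with ' '.join (objective: alternative decomposition).

-- ===== PORT A =====
-- loop body of A: state = (actual_parts, hyphen_found); strings handled as List Char
def stepA (st : List (List Char) × Bool) (part : String) : List (List Char) × Bool :=
  let to_add := PySem.Chars.strip part.toList
  let to_add := if !st.2 then ' ' :: to_add else to_add      -- to_add = ' ' + to_add
  if PySem.Chars.endswith part.toList ['-'] then
    (st.1 ++ [PySem.List.slice to_add none (some (-1))], true)   -- to_add = to_add[:-1]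
  else
    (st.1 ++ [to_add], false)

def join_separated_phrase (phrase_parts : List String) : String :=
  let st := phrase_parts.foldl stepA ([], false)
  String.ofList (PySem.Chars.strip (PySem.Chars.join [] st.1))   -- ''.join(actual_parts).strip()

-- ===== PORT B =====
-- inner while loop of B: consume hyphen-continuation parts, then one closing part if any;
-- returns (the completed word, the remaining parts)
def takeWord : List String → List Char × List String
  | [] => ([], [])                                               -- i = n: word stays ''
  | part :: rest =>
    if PySem.Chars.endswith part.toList ['-'] then
      let (w, r) := takeWord rest
      (PySem.List.slice (PySem.Chars.strip part.toList) none (some (-1)) ++ w, r)  -- word += part.strip()[:-1]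
    else
      (PySem.Chars.strip part.toList, rest)                      -- word += part.strip(); i += 1

theorem takeWord_length_le (parts : List String) : (takeWord parts).2.length ≤ parts.length := by
  induction parts with
  | nil => simp [takeWord]
  | cons p rest ih =>
    simp only [takeWord]
    split_ifs <;> simp <;> omega

theorem takeWord_length_lt (p : String) (rest : List String) :
    (takeWord (p :: rest)).2.length < (p :: rest).length := by
  have := takeWord_length_le rest
  simp only [takeWord]
  split_ifs <;> simp <;> omega

-- outer while loop of B: collect words until the parts are exhausted
def wordsOf (parts : List String) : List (List Char) :=
  if h : parts = [] then []
  else (takeWord parts).1 :: wordsOf (takeWord parts).2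
termination_by parts.length
decreasing_by
  cases parts with
  | nil => exact absurd rfl h
  | cons p rest => exact takeWord_length_lt p rest

def join_separated_phrase_alt (phrase_parts : List String) : String :=
  String.ofList (PySem.Chars.strip (PySem.Chars.join [' '] (wordsOf phrase_parts)))   -- ' '.join(words).strip()

-- ===== PRECONDITION & SPEC =====
def Spec_join_separated_phrase (phrase_parts : List String) (out : String) : Prop := out = join_separated_phrase_alt phrase_parts
instance (phrase_parts : List String) (out : String) : Decidable (Spec_join_separated_phrase phrase_parts out) := by unfold Spec_join_separated_phrase; infer_instance

-- ===== CLAIM (what is proved, stated in full; the proofs are below) =====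
def Claim_equal_join_separated_phrase : Prop := ∀ (phrase_parts : List String), Dom_join_separated_phrase phrase_parts → Spec_join_separated_phrase phrase_parts (join_separated_phrase phrase_parts)

-- ===== LEMMAS AND PROOFS =====

-- flatten of words each prefixed with a space (the shape A's fragment list concatenates to)
def wsFlat (words : List (List Char)) : List Char := (words.map (' ' :: ·)).flatten

theorem join_nil_eq_flatten (ws : List (List Char)) : PySem.Chars.join [] ws = ws.flatten := by
  induction ws with
  | nil => rfl
  | cons w ws ih =>
    cases ws with
    | nil => simp [PySem.Chars.join, List.intercalate]
    | cons x xs =>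
      simp only [PySem.Chars.join, List.intercalate] at *
      simp [List.intersperse] at *
      simpa using ih

theorem join_space_cons (w : List Char) (ws : List (List Char)) :
    PySem.Chars.join [' '] (w :: ws) = w ++ wsFlat ws := by
  induction ws generalizing w with
  | nil => simp [PySem.Chars.join, List.intercalate, wsFlat]
  | cons x xs ih =>
    simp only [PySem.Chars.join, List.intercalate, List.intersperse] at *
    simp [wsFlat] at *
    simp [ih x]

theorem wsFlat_eq_space_join (ws : List (List Char)) :
    wsFlat ws = (if ws = [] then [] else ' ' :: PySem.Chars.join [' '] ws) := by
  cases ws with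
  | nil => rfl
  | cons w xs => simp [join_space_cons w xs, wsFlat]

theorem strip_cons_space (x : List Char) : PySem.Chars.strip (' ' :: x) = PySem.Chars.strip x := by
  simp [PySem.Chars.strip, PySem.Chars.lstrip, PySem.Chars.isspace]

theorem strip_wsFlat (ws : List (List Char)) :
    PySem.Chars.strip (wsFlat ws) = PySem.Chars.strip (PySem.Chars.join [' '] ws) := by
  rw [wsFlat_eq_space_join]
  by_cases h : ws = []
  · simp [h, PySem.Chars.join, List.intercalate]
  · simp [h, strip_cons_space]

-- a stripped string still ends with '-' when the raw string does (so it is nonempty)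
theorem strip_endswith_dash (cs : List Char) (h : PySem.Chars.endswith cs ['-'] = true) :
    ∃ w, PySem.Chars.strip cs = w ++ ['-'] := by
  have hs : ['-'] <:+ cs := by
    simpa [PySem.Chars.endswith, List.isSuffixOf_iff_suffix] using h
  obtain ⟨u, hu⟩ := hs
  subst hu
  simp only [PySem.Chars.strip, PySem.Chars.lstrip, List.dropWhile_append]
  by_cases he : (List.dropWhile PySem.Chars.isspace u).isEmpty
  · refine ⟨[], ?_⟩
    simp [he, PySem.Chars.isspace, PySem.Chars.rstrip]
  · refine ⟨List.dropWhile PySem.Chars.isspace u, ?_⟩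
    simp [he, PySem.Chars.rstrip, PySem.Chars.isspace]

-- the fragment A appends for a part seen in flag state h
def fragA (part : String) (h : Bool) : List Char :=
  let t := PySem.Chars.strip part.toList
  let t := if !h then ' ' :: t else t
  if PySem.Chars.endswith part.toList ['-'] then PySem.List.slice t none (some (-1)) else t

theorem stepA_eq (st : List (List Char) × Bool) (part : String) :
    stepA st part = (st.1 ++ [fragA part st.2], PySem.Chars.endswith part.toList ['-']) := by
  simp only [stepA, fragA]
  split_ifs <;> simp_all

-- stepA never reads the accumulated list, so the fold factors through the empty accumulator
theorem foldl_stepA_shift (parts : List String) :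
    ∀ (acc : List (List Char)) (h : Bool),
      parts.foldl stepA (acc, h) =
        (acc ++ (parts.foldl stepA ([], h)).1, (parts.foldl stepA ([], h)).2) := by
  induction parts with
  | nil => intro acc h; simp
  | cons p rest ih =>
    intro acc h
    simp only [List.foldl_cons, stepA_eq, List.nil_append]
    rw [ih (acc ++ [fragA p h]), ih [fragA p h]]
    simp

-- flatten of A's fragments, as a function of the flag state
def fA (h : Bool) (parts : List String) : List Char := ((parts.foldl stepA ([], h)).1).flatten

theorem fA_nil (h : Bool) : fA h [] = [] := rfl

theorem fA_cons (h : Bool) (p : String) (rest : List String) :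
    fA h (p :: rest) = fragA p h ++ fA (PySem.Chars.endswith p.toList ['-']) rest := by
  simp only [fA, List.foldl_cons, stepA_eq, List.nil_append]
  rw [foldl_stepA_shift]
  simp

theorem wordsOf_nil : wordsOf [] = [] := by simp [wordsOf]

theorem wordsOf_cons (p : String) (rest : List String) :
    wordsOf (p :: rest) = (takeWord (p :: rest)).1 :: wordsOf (takeWord (p :: rest)).2 := by
  rw [wordsOf]; simp

-- main invariant: A's concatenated fragments = the space-prefixed flatten of B's words;
-- in hyphen state the current word continues with takeWord
theorem main_inv (n : Nat) : ∀ (parts : List String), parts.length ≤ n →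
    fA false parts = wsFlat (wordsOf parts) ∧
    fA true parts = (takeWord parts).1 ++ wsFlat (wordsOf (takeWord parts).2) := by
  induction n with
  | zero =>
    intro parts hlen
    have : parts = [] := List.eq_nil_of_length_eq_zero (Nat.le_zero.mp hlen)
    subst this
    simp [fA_nil, wordsOf_nil, takeWord, wsFlat]
  | succ n ih =>
    intro parts hlen
    cases parts with
    | nil => simp [fA_nil, wordsOf_nil, takeWord, wsFlat]
    | cons p rest =>
      have hr : rest.length ≤ n := by simpa using hlen
      by_cases hd : PySem.Chars.endswith p.toList ['-'] = true
      · -- hyphen part: both sides continue the current word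
        obtain ⟨w, hw⟩ := strip_endswith_dash p.toList hd
        have hslice : PySem.List.slice (PySem.Chars.strip p.toList) none (some (-1)) =
            (PySem.Chars.strip p.toList).dropLast := PySem.List.slice_to_neg_one _
        have hfrag0 : fragA p false = ' ' :: (PySem.Chars.strip p.toList).dropLast := by
          simp only [fragA, hd, if_pos, Bool.not_false, PySem.List.slice_to_neg_one]
          rw [hw, ← List.cons_append, List.dropLast_concat, List.dropLast_concat]
        have hfrag1 : fragA p true = (PySem.Chars.strip p.toList).dropLast := by
          simp [fragA, hd, hslice]
        have htw : takeWord (p :: rest) =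
            ((PySem.Chars.strip p.toList).dropLast ++ (takeWord rest).1, (takeWord rest).2) := by
          simp [takeWord, hd, hslice]
        obtain ⟨_, ih2⟩ := ih rest hr
        constructor
        · rw [fA_cons, hd, hfrag0, ih2, wordsOf_cons, htw]
          simp [wsFlat]
        · rw [fA_cons, hd, hfrag1, ih2, htw]
          simp
      · -- closing part: the word is flushed on both sides
        have hfrag0 : fragA p false = ' ' :: PySem.Chars.strip p.toList := by
          simp [fragA, hd]
        have hfrag1 : fragA p true = PySem.Chars.strip p.toList := by
          simp [fragA, hd]
        have htw : takeWord (p :: rest) = (PySem.Chars.strip p.toList, rest) := by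
          simp [takeWord, hd]
        obtain ⟨ih1, _⟩ := ih rest hr
        have hd' : PySem.Chars.endswith p.toList ['-'] = false := by
          simpa using hd
        constructor
        · rw [fA_cons, hd', hfrag0, ih1, wordsOf_cons, htw]
          simp [wsFlat]
        · rw [fA_cons, hd', hfrag1, ih1, htw]

-- ===== VERDICT (by name: the statement is the Claim_ definition above) =====
theorem join_separated_phrase_spec : Claim_equal_join_separated_phrase := by
  intro phrase_parts _
  unfold Spec_join_separated_phrase join_separated_phrase join_separated_phrase_alt
  have h := (main_inv phrase_parts.length phrase_parts le_rfl).1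
  simp only []
  rw [join_nil_eq_flatten]
  show String.ofList (PySem.Chars.strip (fA false phrase_parts)) = _
  rw [h, strip_wsFlat]
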